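-- pv_equiv track=rewrite | github.com/Golisciano/Programacion-I | Clase 2/Ej 2.13.py | en_geringoso
-- ===== SOURCE A (Python) =====
-- def en_geringoso(palabra):
--     """Traduce una palabra al geringoso"""
--     traduccion = ''
--     for c in palabra:
--         if c.lower() in 'aeiou':
--             traduccion += c + 'p' + c
--         else:
--             traduccion += c
--     return traduccion
-- ===== SOURCE B (Python) =====
-- def en_geringoso(palabra):
--     """Traduce una palabra al geringoso"""
--     # staged whole-string passes: one replace per vowel; later passes never
--     # touch inserted text because each pass targets a different vowel and 'p'
--     # is not a vowel
--     for v in 'aeiouAEIOU':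
--         palabra = palabra.replace(v, v + 'p' + v)
--     return palabra
-- ===== Notes on version B (the rewrite author's own statement) =====
-- stated objective: alternative
-- what changed: Replaces A's single per-character loop with branch and concatenation by ten staged whole-string str.replace passes, one per vowel (correct because later passes target different vowels and never touch the inserted 'p' or vowel copies).
import Mathlib
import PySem

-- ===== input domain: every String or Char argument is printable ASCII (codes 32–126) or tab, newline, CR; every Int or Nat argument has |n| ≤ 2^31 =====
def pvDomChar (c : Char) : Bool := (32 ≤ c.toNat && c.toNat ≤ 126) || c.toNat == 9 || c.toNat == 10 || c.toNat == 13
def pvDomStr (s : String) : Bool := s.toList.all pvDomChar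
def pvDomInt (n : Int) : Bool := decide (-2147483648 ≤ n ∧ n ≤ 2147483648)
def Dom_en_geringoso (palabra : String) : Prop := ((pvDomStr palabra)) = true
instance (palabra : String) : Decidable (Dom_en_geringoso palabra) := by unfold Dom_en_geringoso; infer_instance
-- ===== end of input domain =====

-- B replaces A's single per-character loop by ten staged whole-string replace passes,
-- one per vowel (alternative decomposition, same result).

-- ===== PORT A =====
-- for c in palabra: if c.lower() in 'aeiou': traduccion += c+'p'+c else: traduccion += c
def en_geringoso (palabra : String) : String :=
  String.ofList (palabra.toList.foldl
    (fun traduccion c =>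
      if PySem.Chars.isIn (PySem.Chars.lower [c]) ['a', 'e', 'i', 'o', 'u'] then
        traduccion ++ [c, 'p', c]
      else
        traduccion ++ [c])
    [])

-- ===== PORT B =====
-- for v in 'aeiouAEIOU': palabra = palabra.replace(v, v + 'p' + v); return palabra
def en_geringoso_alt (palabra : String) : String :=
  ['a', 'e', 'i', 'o', 'u', 'A', 'E', 'I', 'O', 'U'].foldl
    (fun s v => PySem.Str.replace s (String.ofList [v]) (String.ofList [v, 'p', v]))
    palabra

-- ===== PRECONDITION & SPEC =====
def Spec_en_geringoso (palabra : String) (out : String) : Prop := out = en_geringoso_alt palabra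
instance (palabra : String) (out : String) : Decidable (Spec_en_geringoso palabra out) := by unfold Spec_en_geringoso; infer_instance

-- ===== CLAIM (what is proved, stated in full; the proofs are below) =====
def Claim_equal_en_geringoso : Prop := ∀ (palabra : String), Dom_en_geringoso palabra → Spec_en_geringoso palabra (en_geringoso palabra)

-- ===== LEMMAS AND PROOFS =====

-- the per-character substitution both programs realise, parametrised by the vowels still to process
def gerSub (vs : List Char) (c : Char) : List Char :=
  if c ∈ vs then [c, 'p', c] else [c]

-- replacing the single character v by nv is exactly a flatMap over the characters
theorem replace_go_single (v : Char) (nv : List Char) :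
    ∀ (fuel : Nat) (l acc : List Char), l.length ≤ fuel →
      PySem.Chars.replace.go [v] nv fuel l acc
        = acc.reverse ++ l.flatMap (fun c => if c = v then nv else [c]) := by
  intro fuel
  induction fuel with
  | zero =>
    intro l acc h
    have : l = [] := List.eq_nil_of_length_eq_zero (Nat.le_zero.mp h)
    subst this
    simp [PySem.Chars.replace.go]
  | succ n ih =>
    intro l acc h
    cases l with
    | nil => simp [PySem.Chars.replace.go]
    | cons c t =>
      simp only [PySem.Chars.replace.go]
      by_cases hc : c = v
      · subst hc
        have : List.isPrefixOf [c] (c :: t) = true := by simp [List.isPrefixOf]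
        rw [if_pos this]
        have ht : t.length ≤ n := by simpa using h
        rw [show List.drop (List.length [c]) (c :: t) = t by simp]
        rw [ih t (nv.reverse ++ acc) ht]
        simp
      · have hpre : ¬ (List.isPrefixOf [v] (c :: t) = true) := by
          simp only [List.isPrefixOf, Bool.and_eq_true, beq_iff_eq]
          intro he
          exact hc he.1.symm
        rw [if_neg hpre]
        have ht : t.length ≤ n := by simpa using h
        rw [ih t (c :: acc) ht]
        simp [hc]

theorem replace_single (v : Char) (nv : List Char) (l : List Char) :
    PySem.Chars.replace l [v] nv = l.flatMap (fun c => if c = v then nv else [c]) := by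
  unfold PySem.Chars.replace
  rw [if_neg (by simp)]
  simpa using replace_go_single v nv l.length l [] le_rfl

-- one staged pass followed by the remaining passes equals one flatMap, when the
-- inserted characters (the vowel itself and 'p') are untouched by the remaining passes
theorem ger_fold (vs : List Char) (hnd : vs.Nodup) (hp : 'p' ∉ vs) :
    ∀ l : List Char,
      vs.foldl (fun s v => PySem.Chars.replace s [v] [v, 'p', v]) l
        = l.flatMap (gerSub vs) := by
  induction vs with
  | nil =>
    intro l
    simp only [List.foldl_nil]
    have hg : gerSub [] = fun c => [c] := by
      funext c; simp [gerSub]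
    rw [hg, List.flatMap_singleton']
  | cons v vs ih =>
    intro l
    have hv : v ∉ vs := (List.nodup_cons.mp hnd).1
    have hnd' : vs.Nodup := (List.nodup_cons.mp hnd).2
    have hp' : 'p' ∉ vs := fun hx => hp (List.mem_cons_of_mem _ hx)
    have hpv : v ≠ 'p' := fun he => hp (he ▸ List.mem_cons_self)
    simp only [List.foldl_cons]
    rw [replace_single, ih hnd' hp', List.flatMap_assoc]
    apply List.flatMap_congr  -- pointwise equality of the substitutions
    intro c _
    by_cases hc : c = v
    · subst hc
      simp [gerSub, hv, hp', List.mem_cons]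
    · simp [gerSub, hc, List.mem_cons]

-- exhaustive per-codepoint check backing ger_branch
set_option maxRecDepth 4096 in
theorem ger_branch_fin : ∀ n : Fin 127,
    (if PySem.Chars.isIn (PySem.Chars.lower [Char.ofNat n.val]) ['a', 'e', 'i', 'o', 'u'] then
       [Char.ofNat n.val, 'p', Char.ofNat n.val]
     else [Char.ofNat n.val])
    = gerSub ['a', 'e', 'i', 'o', 'u', 'A', 'E', 'I', 'O', 'U'] (Char.ofNat n.val) := by decide

-- A's branch agrees with gerSub on every domain character (exhaustive over codepoints < 127)
theorem ger_branch (c : Char) (h : pvDomChar c = true) :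
    (if PySem.Chars.isIn (PySem.Chars.lower [c]) ['a', 'e', 'i', 'o', 'u'] then [c, 'p', c]
     else [c])
    = gerSub ['a', 'e', 'i', 'o', 'u', 'A', 'E', 'I', 'O', 'U'] c := by
  have hlt : c.toNat < 127 := by
    simp [pvDomChar] at h
    omega
  have hc : Char.ofNat c.toNat = c := Char.ofNat_toNat c
  have := ger_branch_fin ⟨c.toNat, hlt⟩
  simpa [hc] using this

-- A's accumulator loop is the same flatMap
theorem ger_loop (l : List Char) (h : ∀ c ∈ l, pvDomChar c = true) (acc : List Char) :
    l.foldl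
      (fun traduccion c =>
        if PySem.Chars.isIn (PySem.Chars.lower [c]) ['a', 'e', 'i', 'o', 'u'] then
          traduccion ++ [c, 'p', c]
        else
          traduccion ++ [c])
      acc
    = acc ++ l.flatMap (gerSub ['a', 'e', 'i', 'o', 'u', 'A', 'E', 'I', 'O', 'U']) := by
  induction l generalizing acc with
  | nil => simp
  | cons c cs ih =>
    have hc := h c (List.mem_cons_self)
    have hcs : ∀ x ∈ cs, pvDomChar x = true := fun x hx => h x (List.mem_cons_of_mem _ hx)
    simp only [List.foldl_cons, List.flatMap_cons, ih hcs]
    rw [← ger_branch c hc]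
    split <;> simp

-- ===== VERDICT (by name: the statement is the Claim_ definition above) =====
theorem en_geringoso_spec : Claim_equal_en_geringoso := by
  intro palabra hdom
  unfold Spec_en_geringoso en_geringoso en_geringoso_alt
  have h : ∀ c ∈ palabra.toList, pvDomChar c = true := by
    have := hdom
    unfold Dom_en_geringoso pvDomStr at this
    simpa [List.all_eq_true] using this
  rw [ger_loop _ h]
  have hstr : ∀ (vs : List Char) (s : String),
      vs.foldl (fun s v => PySem.Str.replace s (String.ofList [v]) (String.ofList [v, 'p', v])) s
        = String.ofList (vs.foldl (fun l v => PySem.Chars.replace l [v] [v, 'p', v]) s.toList) := by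
    intro vs
    induction vs with
    | nil => intro s; simp
    | cons v vs ih =>
      intro s
      simp only [List.foldl_cons]
      rw [ih]
      simp [PySem.Str.replace]
  rw [hstr]
  rw [ger_fold _ (by decide) (by decide)]
  simp
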